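-- pv_equiv track=rewrite | github.com/sktmbtkr01/his-agentic | voice-agent/app/speech/tts.py | _escape_ssml
-- ===== SOURCE A (Python) =====
-- def _escape_ssml(text: str) -> str:
--     """Escape special characters for SSML."""
--     replacements = {
--         "&": "&amp;",
--         "<": "&lt;",
--         ">": "&gt;",
--         '"': "&quot;",
--         "'": "&apos;",
--     }
--     for old, new in replacements.items():
--         text = text.replace(old, new)
--     return text
-- ===== SOURCE B (Python) =====
-- def _escape_ssml(text: str) -> str:
--     """Escape special characters for SSML."""
--     mapping = {
--         "&": "&amp;",
--         "<": "&lt;",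
--         ">": "&gt;",
--         '"': "&quot;",
--         "'": "&apos;",
--     }
--     out = []
--     for ch in text:
--         out.append(mapping.get(ch, ch))
--     return "".join(out)
-- ===== Notes on version B (the rewrite author's own statement) =====
-- stated objective: idiomatic
-- what changed: Replaces five sequential full-string str.replace passes with a single character-by-character pass over the input consulting a lookup table built once, joining the mapped pieces at the end.
import Mathlib
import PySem

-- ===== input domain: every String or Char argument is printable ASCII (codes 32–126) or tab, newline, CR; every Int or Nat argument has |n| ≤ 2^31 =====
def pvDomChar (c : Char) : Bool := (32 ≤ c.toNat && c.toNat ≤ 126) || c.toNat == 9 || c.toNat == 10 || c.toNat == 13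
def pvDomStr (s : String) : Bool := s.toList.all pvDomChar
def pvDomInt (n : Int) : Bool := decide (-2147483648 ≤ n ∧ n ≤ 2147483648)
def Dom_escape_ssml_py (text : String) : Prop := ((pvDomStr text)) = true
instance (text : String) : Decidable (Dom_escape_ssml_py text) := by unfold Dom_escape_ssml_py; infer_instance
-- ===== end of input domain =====

-- B: one character-by-character pass with a lookup table built once, instead of five sequential str.replace passes (same cost class).


-- ===== PORT A =====
def escape_ssml_py (text : String) : String :=
  -- replacements.items() iterated in insertion order; text = text.replace(old, new)
  let t1 := PySem.Str.replace text "&" "&amp;"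
  let t2 := PySem.Str.replace t1 "<" "&lt;"
  let t3 := PySem.Str.replace t2 ">" "&gt;"
  let t4 := PySem.Str.replace t3 "\"" "&quot;"
  let t5 := PySem.Str.replace t4 "'" "&apos;"
  t5

-- ===== PORT B =====
def pvMapping : PySem.Dict String String :=
  PySem.Dict.ofList [("&", "&amp;"), ("<", "&lt;"), (">", "&gt;"), ("\"", "&quot;"), ("'", "&apos;")]

def escape_ssml_py_alt (text : String) : String :=
  let out := text.toList.foldl
    (fun acc ch => acc ++ [PySem.Dict.getD pvMapping (String.ofList [ch]) (String.ofList [ch])]) []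
  PySem.Str.join "" out

-- ===== PRECONDITION & SPEC =====
def Spec_escape_ssml_py (text : String) (out : String) : Prop := out = escape_ssml_py_alt text
instance (text : String) (out : String) : Decidable (Spec_escape_ssml_py text out) := by unfold Spec_escape_ssml_py; infer_instance

-- ===== CLAIM (what is proved, stated in full; the proofs are below) =====
def Claim_equal_escape_ssml_py : Prop := ∀ (text : String), Dom_escape_ssml_py text → Spec_escape_ssml_py text (escape_ssml_py text)

-- ===== LEMMAS AND PROOFS =====

-- single-char replacement as a flatMap
def pvSub (o : Char) (new : List Char) (c : Char) : List Char := if c = o then new else [c]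

theorem pv_go_single (o : Char) (new : List Char) :
    ∀ (l : List Char) (fuel : Nat) (acc : List Char), l.length ≤ fuel →
      PySem.Chars.replace.go [o] new fuel l acc = acc.reverse ++ l.flatMap (pvSub o new) := by
  intro l
  induction l with
  | nil =>
    intro fuel acc _
    cases fuel <;> simp [PySem.Chars.replace.go]
  | cons c t ih =>
    intro fuel acc h
    cases fuel with
    | zero => simp at h
    | succ f =>
      by_cases hc : c = o
      · subst hc
        have : [c].isPrefixOf (c :: t) = true := by simp [List.isPrefixOf]
        simp only [PySem.Chars.replace.go, this, if_pos]
        rw [show List.drop (List.length [c]) (c :: t) = t from rfl]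
        rw [ih f (new.reverse ++ acc) (by simpa using Nat.le_of_succ_le_succ h)]
        simp [pvSub]
      · have : [o].isPrefixOf (c :: t) = false := by
          simp [List.isPrefixOf]
          exact fun he => absurd he.symm hc
        simp only [PySem.Chars.replace.go]
        rw [if_neg (by simp [this])]
        rw [ih f (c :: acc) (by simpa using Nat.le_of_succ_le_succ h)]
        simp [pvSub, hc]

theorem pv_replace_single (s : List Char) (o : Char) (new : List Char) :
    PySem.Chars.replace s [o] new = s.flatMap (pvSub o new) := by
  simp only [PySem.Chars.replace, List.isEmpty_cons]
  exact pv_go_single o new s s.length [] (le_refl _)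

def pvG (c : Char) : List Char :=
  (PySem.Dict.getD pvMapping (String.ofList [c]) (String.ofList [c])).toList

theorem pv_composed (c : Char) :
    ((((pvSub '&' "&amp;".toList c).flatMap (pvSub '<' "&lt;".toList)).flatMap
        (pvSub '>' "&gt;".toList)).flatMap (pvSub '"' "&quot;".toList)).flatMap
      (pvSub '\'' "&apos;".toList) = pvG c := by
  by_cases h1 : c = '&'
  · subst h1; decide
  by_cases h2 : c = '<'
  · subst h2; decide
  by_cases h3 : c = '>'
  · subst h3; decide
  by_cases h4 : c = '"'
  · subst h4; decide
  by_cases h5 : c = '\''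
  · subst h5; decide
  · have e1 : pvSub '&' "&amp;".toList c = [c] := by simp [pvSub, h1]
    have e2 : pvSub '<' "&lt;".toList c = [c] := by simp [pvSub, h2]
    have e3 : pvSub '>' "&gt;".toList c = [c] := by simp [pvSub, h3]
    have e4 : pvSub '"' "&quot;".toList c = [c] := by simp [pvSub, h4]
    have e5 : pvSub '\'' "&apos;".toList c = [c] := by simp [pvSub, h5]
    simp only [List.flatMap_cons, List.flatMap_nil, List.append_nil, e1, e2, e3, e4, e5]
    have key : ∀ (k : Char), c ≠ k → (String.ofList [k] == String.ofList [c]) = false := by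
      intro k hk
      rw [beq_eq_false_iff_ne]
      intro he
      have h2 := congrArg String.toList he
      simp at h2
      exact hk h2.symm
    have k1 := key '&' h1
    have k2 := key '<' h2
    have k3 := key '>' h3
    have k4 := key '"' h4
    have k5 := key '\'' h5
    have hi : pvMapping.items = [("&", "&amp;"), ("<", "&lt;"), (">", "&gt;"), ("\"", "&quot;"), ("'", "&apos;")] := by rfl
    simp only [pvG, PySem.Dict.getD, PySem.Dict.get?, hi, List.find?,
      show ("&" : String) = String.ofList ['&'] from rfl,
      show ("<" : String) = String.ofList ['<'] from rfl, show ((">" : String)) = String.ofList ['>'] from rfl,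
      show ("\"" : String) = String.ofList ['"'] from rfl, show ("'" : String) = String.ofList ['\''] from rfl]
    simp [k1, k2, k3, k4, k5]

theorem pv_foldl_map {α β : Type} (f : α → β) (l : List α) (acc : List β) :
    l.foldl (fun a x => a ++ [f x]) acc = acc ++ l.map f := by
  induction l generalizing acc with
  | nil => simp
  | cons x t ih => simp [List.foldl_cons, ih]

theorem pv_toListA (text : String) :
    (escape_ssml_py text).toList = text.toList.flatMap pvG := by
  simp only [escape_ssml_py, PySem.Str.replace, String.toList_ofList,
    show ("&" : String).toList = ['&'] from rfl, show ("<" : String).toList = ['<'] from rfl,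
    show (">" : String).toList = ['>'] from rfl, show ("\"" : String).toList = ['"'] from rfl,
    show ("'" : String).toList = ['\''] from rfl]
  rw [pv_replace_single, pv_replace_single, pv_replace_single, pv_replace_single, pv_replace_single]
  generalize text.toList = l
  induction l with
  | nil => rfl
  | cons c t ih =>
    simp only [List.flatMap_cons, List.flatMap_append, ih]
    exact congrArg (fun z => z ++ List.flatMap pvG t) (pv_composed c)

theorem pv_flatten_intersperse_nil {α : Type} (l : List (List α)) :
    (List.intersperse ([] : List α) l).flatten = l.flatten := by
  induction l with
  | nil => rfl
  | cons a t ih =>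
    cases t with
    | nil => rfl
    | cons b t' =>
      show (a :: [] :: List.intersperse [] (b :: t')).flatten = (a :: b :: t').flatten
      simp only [List.flatten_cons] at *
      simp [ih]

theorem pv_toListB (text : String) :
    (escape_ssml_py_alt text).toList = text.toList.flatMap pvG := by
  simp only [escape_ssml_py_alt, PySem.Str.toList_join, pv_foldl_map, List.nil_append,
    PySem.Chars.join, List.map_map]
  show List.intercalate "".toList _ = _
  simp only [List.intercalate, List.flatMap]
  rw [show ("" : String).toList = [] from rfl, pv_flatten_intersperse_nil]
  rfl

-- ===== VERDICT (by name: the statement is the Claim_ definition above) =====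
theorem escape_ssml_py_spec : Claim_equal_escape_ssml_py := by
  intro text _
  unfold Spec_escape_ssml_py
  have h := (pv_toListA text).trans (pv_toListB text).symm
  have := congrArg String.ofList h
  simpa using this
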